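-- pv_equiv track=rewrite | github.com/TobiasRoeding/advent-of-code-2021 | src/day3.py | check_bits
-- ===== SOURCE A (Python) =====
-- from typing import List
--
-- def check_bits(arr: List[str], pos: int) -> int:
--     result = 0
--     for a in arr:
--         b = a[pos]
--         if b == "1":
--             result += 1
--         else:
--             result -= 1
--     return result
-- ===== SOURCE B (Python) =====
-- from typing import List
--
--
-- def _lower(col, x):
--     # first index at which x could be inserted keeping col sorted (leftmost)
--     lo, hi = 0, len(col)
--     while lo < hi:
--         mid = (lo + hi) // 2
--         if col[mid] < x:
--             lo = mid + 1
--         else: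
--             hi = mid
--     return lo
--
--
-- def _upper(col, x):
--     # first index past the run of x in sorted col (rightmost insertion point)
--     lo, hi = 0, len(col)
--     while lo < hi:
--         mid = (lo + hi) // 2
--         if col[mid] <= x:
--             lo = mid + 1
--         else:
--             hi = mid
--     return lo
--
--
-- def check_bits(arr: List[str], pos: int) -> int:
--     # Sort the column of characters, locate the run of '1's by two binary
--     # searches; its width is the number of '1's, everything else counts -1.
--     col = sorted(a[pos] for a in arr)
--     ones = _upper(col, "1") - _lower(col, "1")
--     return ones - (len(arr) - ones)
-- ===== Notes on version B (the rewrite author's own statement) =====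
-- stated objective: alternative
-- what changed: Instead of A's +1/-1 branch accumulator, B sorts the column of characters and locates the contiguous run of '1's with two hand-written binary searches; the run's width gives the count of '1's and the balance follows arithmetically.
import Mathlib
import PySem

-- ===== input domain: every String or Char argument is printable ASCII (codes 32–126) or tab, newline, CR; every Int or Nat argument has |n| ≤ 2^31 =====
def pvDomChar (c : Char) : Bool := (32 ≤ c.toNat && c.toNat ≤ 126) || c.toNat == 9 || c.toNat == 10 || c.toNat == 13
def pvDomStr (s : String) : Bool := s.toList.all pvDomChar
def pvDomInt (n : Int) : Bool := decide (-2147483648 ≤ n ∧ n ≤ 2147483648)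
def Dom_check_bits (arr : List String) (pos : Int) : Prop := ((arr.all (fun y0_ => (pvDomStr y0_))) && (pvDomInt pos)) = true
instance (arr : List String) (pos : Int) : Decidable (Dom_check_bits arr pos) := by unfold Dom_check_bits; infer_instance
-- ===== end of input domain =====

-- B replaces A's +1/-1 branch accumulator by sorting the column and locating the run of
-- '1's with two binary searches (objective: alternative; not faster).

-- ===== PORT A =====
-- a[pos] is PySem.Str.pyGet?; under Pre_ it is always `some`, so .getD ' ' is exact there
def check_bits (arr : List String) (pos : Int) : Int :=
  arr.foldl (fun result a =>
    let b := (PySem.Str.pyGet? a pos).getD ' '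
    if b = '1' then result + 1 else result - 1) 0

-- ===== PORT B =====
-- _lower: while-loop binary search; col[mid] is always in range (lo < hi ≤ len col),
-- so List.getD is exact there
def pvLower (col : List Char) (x : Char) (lo hi : Nat) : Nat :=
  if lo < hi then
    if col.getD ((lo + hi) / 2) ' ' < x then pvLower col x ((lo + hi) / 2 + 1) hi
    else pvLower col x lo ((lo + hi) / 2)
  else lo
termination_by hi - lo
decreasing_by all_goals omega

-- _upper: same loop with col[mid] <= x
def pvUpper (col : List Char) (x : Char) (lo hi : Nat) : Nat :=
  if lo < hi then
    if col.getD ((lo + hi) / 2) ' ' ≤ x then pvUpper col x ((lo + hi) / 2 + 1) hi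
    else pvUpper col x lo ((lo + hi) / 2)
  else lo
termination_by hi - lo
decreasing_by all_goals omega

def check_bits_alt (arr : List String) (pos : Int) : Int :=
  let col := PySem.List.sorted (arr.map (fun a => (PySem.Str.pyGet? a pos).getD ' ')) (fun c => c) false
  let ones : Int := (pvUpper col '1' 0 col.length : Int) - (pvLower col '1' 0 col.length : Int)
  ones - ((arr.length : Int) - ones)

-- ===== PRECONDITION & SPEC =====
-- Pre_ excludes exactly the inputs where a[pos] raises IndexError for some string in arr
def Pre_check_bits (arr : List String) (pos : Int) : Prop :=
  ∀ a ∈ arr, PySem.Raise.InRange a.toList.length pos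
instance (arr : List String) (pos : Int) : Decidable (Pre_check_bits arr pos) := by unfold Pre_check_bits; infer_instance
def pvWitness_check_bits : List String × Int := (["10", "01", "11"], 0)
def Spec_check_bits (arr : List String) (pos : Int) (out : Int) : Prop := out = check_bits_alt arr pos
instance (arr : List String) (pos : Int) (out : Int) : Decidable (Spec_check_bits arr pos out) := by unfold Spec_check_bits; infer_instance

-- ===== CLAIM =====
def Claim_equal_check_bits : Prop := ∀ (arr : List String) (pos : Int), Dom_check_bits arr pos → Pre_check_bits arr pos → Spec_check_bits arr pos (check_bits arr pos)

-- ===== LEMMAS AND PROOFS =====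

-- A's fold equals 2·(# of '1' characters) − length
lemma check_bits_foldl (pos : Int) (arr : List String) (r : Int) :
    arr.foldl (fun result a =>
      let b := (PySem.Str.pyGet? a pos).getD ' '
      if b = '1' then result + 1 else result - 1) r
      = r + 2 * (arr.countP (fun a => (PySem.Str.pyGet? a pos).getD ' ' = '1') : Nat) - arr.length := by
  induction arr generalizing r with
  | nil => simp
  | cons a t ih =>
    simp only [List.foldl_cons, List.countP_cons, List.length_cons, ih]
    split <;> simp_all <;> ring

-- in a ≤-sorted list a downward-closed predicate holds exactly on the first countP positions
lemma sorted_getD_iff (p : Char → Bool) (hp : ∀ a b : Char, a ≤ b → p b = true → p a = true)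
    (col : List Char) (hs : col.Pairwise (· ≤ ·)) :
    ∀ i, i < col.length → (p (col.getD i ' ') = true ↔ i < col.countP p) := by
  induction col with
  | nil => intro i hi; simp at hi
  | cons c t ih =>
    rcases List.pairwise_cons.mp hs with ⟨hc, ht⟩
    intro i hi
    cases i with
    | zero =>
      simp only [List.getD_cons_zero, List.countP_cons]
      by_cases hpc : p c = true
      · simp [hpc]
      · have h0 : t.countP p = 0 := by
          rw [List.countP_eq_zero]
          intro x hx hpx
          exact hpc (hp c x (hc x hx) hpx)
        simp [hpc, h0]
    | succ j =>
      have hj : j < t.length := by simpa using hi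
      have hiff := ih ht j hj
      rw [List.getD_cons_succ, List.countP_cons, hiff]
      by_cases hpc : p c = true
      · simp [hpc]
      · have h0 : t.countP p = 0 := by
          rw [List.countP_eq_zero]
          intro x hx hpx
          exact hpc (hp c x (hc x hx) hpx)
        simp [hpc, h0]

-- the binary search finds the boundary index k characterized by H
lemma pvLower_eq (col : List Char) (x : Char) (k : Nat)
    (H : ∀ i, i < col.length → ((col.getD i ' ' < x) ↔ i < k)) :
    ∀ n lo hi, hi - lo ≤ n → lo ≤ k → k ≤ hi → hi ≤ col.length → pvLower col x lo hi = k := by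
  intro n
  induction n with
  | zero =>
    intro lo hi h1 h2 h3 h4
    rw [pvLower]
    have hn : ¬ lo < hi := by omega
    simp only [hn, if_false]
    omega
  | succ n ih =>
    intro lo hi h1 h2 h3 h4
    rw [pvLower]
    by_cases hlt : lo < hi
    · simp only [hlt, if_true]
      have hmid : (lo + hi) / 2 < col.length := by omega
      by_cases hc : col.getD ((lo + hi) / 2) ' ' < x
      · have hk := (H _ hmid).mp hc
        simp only [hc, if_true]
        exact ih ((lo + hi) / 2 + 1) hi (by omega) (by omega) h3 h4
      · have hk : ¬ (lo + hi) / 2 < k := fun h => hc ((H _ hmid).mpr h)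
        simp only [hc, if_false]
        exact ih lo ((lo + hi) / 2) (by omega) h2 (by omega) (by omega)
    · simp only [hlt, if_false]; omega

lemma pvUpper_eq (col : List Char) (x : Char) (k : Nat)
    (H : ∀ i, i < col.length → ((col.getD i ' ' ≤ x) ↔ i < k)) :
    ∀ n lo hi, hi - lo ≤ n → lo ≤ k → k ≤ hi → hi ≤ col.length → pvUpper col x lo hi = k := by
  intro n
  induction n with
  | zero =>
    intro lo hi h1 h2 h3 h4
    rw [pvUpper]
    have hn : ¬ lo < hi := by omega
    simp only [hn, if_false]
    omega
  | succ n ih =>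
    intro lo hi h1 h2 h3 h4
    rw [pvUpper]
    by_cases hlt : lo < hi
    · simp only [hlt, if_true]
      have hmid : (lo + hi) / 2 < col.length := by omega
      by_cases hc : col.getD ((lo + hi) / 2) ' ' ≤ x
      · have hk := (H _ hmid).mp hc
        simp only [hc, if_true]
        exact ih ((lo + hi) / 2 + 1) hi (by omega) (by omega) h3 h4
      · have hk : ¬ (lo + hi) / 2 < k := fun h => hc ((H _ hmid).mpr h)
        simp only [hc, if_false]
        exact ih lo ((lo + hi) / 2) (by omega) h2 (by omega) (by omega)
    · simp only [hlt, if_false]; omega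

-- countP (≤ '1') = countP (< '1') + countP (= '1')
lemma countP_le_split (l : List Char) :
    l.countP (fun c => decide (c ≤ '1')) =
      l.countP (fun c => decide (c < '1')) + l.countP (fun c => c = '1') := by
  induction l with
  | nil => simp
  | cons c t ih =>
    simp only [List.countP_cons, ih]
    rcases lt_trichotomy c '1' with h | h | h
    · simp [h, le_of_lt h, ne_of_lt h]; omega
    · simp [h]; omega
    · simp [not_le.mpr h, not_lt.mpr (le_of_lt h), (ne_of_gt h)]

-- ===== VERDICT =====
theorem check_bits_spec : Claim_equal_check_bits := by
  intro arr pos _ _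
  unfold Spec_check_bits check_bits check_bits_alt
  rw [check_bits_foldl]
  set f : String → Char := fun a => (PySem.Str.pyGet? a pos).getD ' ' with hf
  set col := PySem.List.sorted (arr.map f) (fun c => c) false with hcol
  have hperm : col.Perm (arr.map f) := PySem.List.sorted_perm _ _ _
  have hlen : col.length = arr.length := by
    rw [hperm.length_eq, List.length_map]
  have hs : col.Pairwise (· ≤ ·) := by
    simpa using PySem.List.sorted_pairwise (xs := arr.map f) (key := fun c => c)
  have hlow := pvLower_eq col '1' (col.countP (fun c => decide (c < '1')))
    (by
      intro i hi
      have := sorted_getD_iff (fun c => decide (c < '1'))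
        (fun a b hab hb => by simp_all; exact lt_of_le_of_lt hab hb) col hs i hi
      simpa using this)
    col.length 0 col.length (by omega) (by omega) List.countP_le_length (le_refl _)
  have hup := pvUpper_eq col '1' (col.countP (fun c => decide (c ≤ '1')))
    (by
      intro i hi
      have := sorted_getD_iff (fun c => decide (c ≤ '1'))
        (fun a b hab hb => by simp_all; exact le_trans hab hb) col hs i hi
      simpa using this)
    col.length 0 col.length (by omega) (by omega) List.countP_le_length (le_refl _)
  have hsplit := countP_le_split col
  have hcount : col.countP (fun c => c = '1') = arr.countP (fun a => f a = '1') := by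
    rw [hperm.countP_eq, List.countP_map]
    rfl
  simp only [hlow, hup]
  have h1 : (col.countP (fun c => decide (c ≤ '1')) : Int)
      - (col.countP (fun c => decide (c < '1')) : Int)
      = (arr.countP (fun a => f a = '1') : Int) := by
    rw [← hcount]; omega
  rw [h1]
  ring
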